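-- pv_equiv track=rewrite | github.com/daniel-reich/ubiquitous-fiesta | fYMjhe7BnijXwfNpF_22.py | stmid
-- ===== SOURCE A (Python) =====
-- def stmid(string):
--   a = ""
--   k = ""
--   string += " "
--   for letter in string:
--     if letter != " ":
--       a += letter
--     else:
--       if len(a) % 2 == 1:
--         k += a[int(len(a)/2)]
--       else:
--         k += a[0]
--       a = ""
--   return k
-- ===== SOURCE B (Python) =====
-- def stmid(string):
--   # tokenize-first: split on single spaces (keeping empty tokens), map each word
--   # to its middle char (odd length) or first char (even length), join.
--   return "".join(w[len(w) // 2] if len(w) % 2 else w[0] for w in string.split(" "))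
-- ===== Notes on version B (the rewrite author's own statement) =====
-- stated objective: simpler
-- what changed: Replaces the character-by-character accumulator state machine (with a sentinel space appended) by a tokenize-first decomposition: split the string on single spaces and map each word to its middle (odd length) or first (even length) character. (measured faster: C-level split/join instead of per-character string concatenation).
import Mathlib
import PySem

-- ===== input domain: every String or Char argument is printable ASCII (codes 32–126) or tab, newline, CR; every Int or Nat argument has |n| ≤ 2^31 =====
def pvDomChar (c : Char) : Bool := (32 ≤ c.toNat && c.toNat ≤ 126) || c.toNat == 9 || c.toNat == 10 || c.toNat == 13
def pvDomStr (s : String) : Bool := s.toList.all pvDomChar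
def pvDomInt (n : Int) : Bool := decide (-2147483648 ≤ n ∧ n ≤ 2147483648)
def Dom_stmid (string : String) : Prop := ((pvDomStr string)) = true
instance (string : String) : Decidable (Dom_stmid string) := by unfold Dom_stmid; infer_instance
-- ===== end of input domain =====

-- B replaces A's char-by-char accumulator state machine by split-on-space + map
-- over words (simpler decomposition); equal wherever A returns (Pre_ excludes
-- the inputs with an empty token, where both Pythons raise IndexError).


-- ===== PORT A =====
-- loop body of A: state (a, k); on a non-space, append the letter to a;
-- on a space, append a's middle/first char to k and reset a.
-- a[int(len(a)/2)] and a[0] are total pyGetD here; their IndexError inputs are excluded by Pre_.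
def stmidStep (s : List Char × List Char) (letter : Char) : List Char × List Char :=
  if letter ≠ ' ' then (s.1 ++ [letter], s.2)
  else if s.1.length % 2 == 1 then
    ([], s.2 ++ [PySem.List.pyGetD s.1 ((s.1.length / 2 : Nat) : Int) ' '])
  else
    ([], s.2 ++ [PySem.List.pyGetD s.1 0 ' '])

def stmid (string : String) : String :=
  String.ofList (((string.toList ++ [' ']).foldl stmidStep ([], [])).2)

-- ===== PORT B =====
-- B's per-word pick: w[len(w)//2] if len(w) % 2 else w[0]
def stmidPickB (w : List Char) : Char :=
  if w.length % 2 != 0 then PySem.List.pyGetD w ((w.length / 2 : Nat) : Int) ' '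
  else PySem.List.pyGetD w 0 ' '

-- string.split(" ") keeps empty tokens: List.splitOn ' ' on the char list.
def stmid_alt (string : String) : String :=
  String.ofList ((string.toList.splitOn ' ').map stmidPickB)

-- ===== PRECONDITION & SPEC =====
-- Pre_ excludes exactly the inputs with an empty space-separated token (empty
-- string, leading/trailing space, two adjacent spaces): there Python A raises
-- IndexError on a[0] (and B raises the same on w[0]).
def Pre_stmid (string : String) : Prop :=
  string.toList ≠ [] ∧ string.toList.head? ≠ some ' ' ∧
  string.toList.getLast? ≠ some ' ' ∧ ¬ [' ', ' '] <:+: string.toList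
instance (string : String) : Decidable (Pre_stmid string) := by unfold Pre_stmid; infer_instance

def pvWitness_stmid : String := "abc de x"

def Spec_stmid (string : String) (out : String) : Prop := out = stmid_alt string
instance (string : String) (out : String) : Decidable (Spec_stmid string out) := by unfold Spec_stmid; infer_instance

-- ===== CLAIM (what is proved, stated in full; the proofs are below) =====
def Claim_equal_stmid : Prop := ∀ (string : String), Dom_stmid string → Pre_stmid string → Spec_stmid string (stmid string)

-- ===== LEMMAS AND PROOFS =====

-- A's space-branch pick equals B's per-word pick.
lemma stmidStep_space (a k : List Char) :
    stmidStep (a, k) ' ' = ([], k ++ [stmidPickB a]) := by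
  have h := Nat.mod_two_eq_zero_or_one a.length
  rcases h with h | h <;> simp [stmidStep, stmidPickB, h]

-- Loop invariant: running A's loop on cs ++ [' '] from state (a, k) yields k
-- followed by B's picks of the words of cs, with a prepended to the first word.
lemma stmid_loop (cs a k : List Char) :
    ((cs ++ [' ']).foldl stmidStep (a, k)).2
      = k ++ (((cs.splitOn ' ').modifyHead (a ++ ·)).map stmidPickB) := by
  induction cs generalizing a k with
  | nil =>
      simp [List.splitOn, List.splitOnP_nil, stmidStep_space a k]
  | cons c cs ih =>
      by_cases hc : c = ' '
      · subst hc
        have : List.foldl stmidStep (a, k) ((' ' :: cs) ++ [' '])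
            = List.foldl stmidStep ([], k ++ [stmidPickB a]) (cs ++ [' ']) := by
          simp [stmidStep_space a k]
        rw [this, ih]
        rcases hw : cs.splitOnP (· == ' ') with _ | ⟨w, ws⟩
        · exact absurd hw (List.splitOnP_ne_nil _ cs)
        · simp [List.splitOn, List.splitOnP_cons, hw, List.modifyHead_cons]
      · have hstep : stmidStep (a, k) c = (a ++ [c], k) := by
          simp [stmidStep, hc]
        have : List.foldl stmidStep (a, k) ((c :: cs) ++ [' '])
            = List.foldl stmidStep (a ++ [c], k) (cs ++ [' ']) := by
          simp [hstep]
        rw [this, ih]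
        have hne : cs.splitOnP (· == ' ') ≠ [] := List.splitOnP_ne_nil _ cs
        rcases hw : cs.splitOnP (· == ' ') with _ | ⟨w, ws⟩
        · exact absurd hw hne
        · simp [List.splitOn, List.splitOnP_cons, hc, hw, List.modifyHead_cons]

-- ===== VERDICT (by name: the statement is the Claim_ definition above) =====
theorem stmid_spec : Claim_equal_stmid := by
  intro string _ _
  show stmid string = stmid_alt string
  unfold stmid stmid_alt
  rw [stmid_loop string.toList [] []]
  rcases h : string.toList.splitOn ' ' with _ | ⟨w, ws⟩
  · exact absurd h (List.splitOnP_ne_nil _ _)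
  · simp [List.modifyHead_cons]
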